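-- pv_equiv track=rewrite | github.com/moesin-lab/daily-report-skill | scripts/review/parse-opposing-output.py | _parse_plain_text
-- ===== SOURCE A (Python) =====
-- def _parse_plain_text(raw: str) -> tuple[bool, str]:
--     first = raw.splitlines()[0] if raw.splitlines() else ""
--     if first.startswith("CODEX_TIMEOUT") or first.startswith("CODEX_ERROR"):
--         return False, "**本次反方视角生成失败**：`{}`".format(
--             "\n".join(raw.splitlines()[:3])
--         )
--
--     lines = raw.splitlines()
--     started = False
--     kept: list[str] = []
--     for line in lines:
--         if line == "codex" and not started:
--             started = True
--             continue
--         if started and line.startswith("tokens used"):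
--             break
--         if started:
--             kept.append(line)
--     content = "\n".join(kept).strip()
--     if not content:
--         content = raw.strip()
--     return True, content
-- ===== SOURCE B (Python) =====
-- def _parse_plain_text(raw: str) -> tuple[bool, str]:
--     lines = raw.splitlines()
--     first = lines[0] if lines else ""
--     if first.startswith("CODEX_TIMEOUT") or first.startswith("CODEX_ERROR"):
--         return False, "**本次反方视角生成失败**：`{}`".format("\n".join(lines[:3]))
--     try:
--         body = lines[lines.index("codex") + 1:]
--     except ValueError:
--         body = []
--     end = next((i for i, line in enumerate(body) if line.startswith("tokens used")), len(body))
--     content = "\n".join(body[:end]).strip()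
--     return True, content or raw.strip()
-- ===== Notes on version B (the rewrite author's own statement) =====
-- stated objective: simpler
-- what changed: Replaces A's stateful started/kept accumulator loop with index-and-slice decomposition: locate the first 'codex' line with list.index, slice the body after it, and cut at the first 'tokens used' line found via next(enumerate(...)).
import Mathlib
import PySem

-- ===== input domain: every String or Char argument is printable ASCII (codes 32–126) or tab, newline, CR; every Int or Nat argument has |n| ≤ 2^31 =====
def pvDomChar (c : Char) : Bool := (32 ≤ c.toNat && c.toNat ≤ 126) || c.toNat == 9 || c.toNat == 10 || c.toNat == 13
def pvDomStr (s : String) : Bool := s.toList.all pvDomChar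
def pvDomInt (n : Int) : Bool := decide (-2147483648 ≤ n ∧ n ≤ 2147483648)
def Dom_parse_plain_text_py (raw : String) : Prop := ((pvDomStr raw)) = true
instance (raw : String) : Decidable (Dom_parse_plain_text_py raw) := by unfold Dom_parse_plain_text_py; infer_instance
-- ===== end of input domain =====

-- B replaces A's stateful started/kept accumulator loop with an index-and-slice decomposition (simpler).

-- ===== PORT A =====
-- the started/kept loop with break: structural recursion over the lines with the same state
def pvALoop : List String → Bool → List String → List String
  | [], _, kept => kept
  | l :: ls, started, kept =>
    if l == "codex" && !started then pvALoop ls true kept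
    else if started && PySem.Str.startswith l "tokens used" then kept
    else if started then pvALoop ls started (kept ++ [l])
    else pvALoop ls started kept

def parse_plain_text_py (raw : String) : Bool × String :=
  let first := if (PySem.Str.splitlines raw) ≠ [] then (PySem.Str.splitlines raw).headD "" else ""
  if PySem.Str.startswith first "CODEX_TIMEOUT" || PySem.Str.startswith first "CODEX_ERROR" then
    (false, "**本次反方视角生成失败**：`" ++
      PySem.Str.join "\n" (PySem.List.slice (PySem.Str.splitlines raw) none (some 3)) ++ "`")
  else
    let lines := PySem.Str.splitlines raw
    let kept := pvALoop lines false []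
    let content := PySem.Str.strip (PySem.Str.join "\n" kept)
    let content := if content == "" then PySem.Str.strip raw else content
    (true, content)

-- ===== PORT B =====
def parse_plain_text_py_alt (raw : String) : Bool × String :=
  let lines := PySem.Str.splitlines raw
  let first := lines.headD ""
  if PySem.Str.startswith first "CODEX_TIMEOUT" || PySem.Str.startswith first "CODEX_ERROR" then
    (false, "**本次反方视角生成失败**：`" ++ PySem.Str.join "\n" (PySem.List.slice lines none (some 3)) ++ "`")
  else
    let body := match PySem.List.index? lines "codex" with
      | some i => PySem.List.slice lines (some ((i : Int) + 1)) none
      | none => []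
    -- next((i for i, line in enumerate(body) if line.startswith("tokens used")), len(body))
    let stop := body.findIdx (fun line => PySem.Str.startswith line "tokens used")
    let content := PySem.Str.strip (PySem.Str.join "\n" (body.take stop))
    (true, if content == "" then PySem.Str.strip raw else content)

-- ===== PRECONDITION & SPEC =====
def Spec_parse_plain_text_py (raw : String) (out : Bool × String) : Prop := out = parse_plain_text_py_alt raw
instance (raw : String) (out : Bool × String) : Decidable (Spec_parse_plain_text_py raw out) := by unfold Spec_parse_plain_text_py; infer_instance

-- ===== CLAIM (what is proved, stated in full; the proofs are below) =====
def Claim_equal_parse_plain_text_py : Prop := ∀ (raw : String), Dom_parse_plain_text_py raw → Spec_parse_plain_text_py raw (parse_plain_text_py raw)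

-- ===== LEMMAS AND PROOFS =====

theorem pvALoop_started (ls : List String) : ∀ kept, pvALoop ls true kept =
    kept ++ ls.take (ls.findIdx (fun line => PySem.Str.startswith line "tokens used")) := by
  induction ls with
  | nil => intro kept; simp [pvALoop]
  | cons l ls ih =>
    intro kept
    cases h : PySem.Str.startswith l "tokens used" <;>
      simp only [pvALoop, List.findIdx_cons, h, Bool.and_false, Bool.not_true, if_false,
        Bool.false_eq_true, Bool.true_and, if_true, cond_true, cond_false, List.take_zero,
        List.append_nil, List.take_succ_cons, ih, List.append_assoc, List.singleton_append]

theorem pvALoop_unstarted (ls : List String) : pvALoop ls false [] =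
    (match PySem.List.index? ls "codex" with
      | some i => (ls.drop (i + 1)).take ((ls.drop (i + 1)).findIdx (fun line => PySem.Str.startswith line "tokens used"))
      | none => []) := by
  induction ls with
  | nil => simp [pvALoop, PySem.List.index?]
  | cons l ls ih =>
    by_cases h : l = "codex"
    · subst h
      rw [PySem.List.index?_cons_self "codex" ls]
      simp only [pvALoop, beq_self_eq_true, Bool.not_false, Bool.and_self, if_true,
        pvALoop_started, List.nil_append, Nat.zero_add, List.drop_succ_cons, List.drop_zero]
    · have hb : (l == "codex") = false := by simp [h]
      rw [PySem.List.index?_cons_of_ne ls h]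
      simp only [pvALoop, hb, Bool.false_and, Bool.false_eq_true, if_false, ih]
      cases PySem.List.index? ls "codex" with
      | none => simp
      | some i => simp

-- ===== VERDICT (by name: the statement is the Claim_ definition above) =====
theorem parse_plain_text_py_spec : Claim_equal_parse_plain_text_py := by
  intro raw _
  unfold Spec_parse_plain_text_py parse_plain_text_py parse_plain_text_py_alt
  cases hl : PySem.Str.splitlines raw with
  | nil => simp [pvALoop, PySem.List.index?]
  | cons f ls =>
    simp only [ne_eq, reduceCtorEq, not_false_eq_true, if_true, List.headD_cons]
    split
    · rfl
    · simp only [pvALoop_unstarted]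
      cases hi : PySem.List.index? (f :: ls) "codex" with
      | none => simp
      | some i =>
        have : PySem.List.slice (f :: ls) (some ((i : Int) + 1)) none = (f :: ls).drop (i + 1) := by
          have := PySem.List.slice_from_natCast (f :: ls) (i + 1)
          push_cast at this ⊢
          exact this
        simp [this]
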